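-- pv_equiv track=rewrite | github.com/TUBAF-IFI-ConnectedLecturer/Data_aggregation | cl-pipeline/stages/liascript/extractLiaScriptMetadata.py | _extract_multiline_field
-- ===== SOURCE A (Python) =====
-- def _extract_multiline_field(header, field_name):
--     """
--     Extract multi-line field values.
--
--     A multi-line field starts with "field:" and continues until:
--     - An empty line
--     - A line starting with another field (contains ":")
--     - A line starting with @ (special directive)
--     """
--     lines = header.split('\n')
--     values = []
--     in_field = False
--     current_value = []
--
--     for line in lines:
--         stripped = line.strip()
--
--         # Check if this line starts the field
--         if stripped.lower().startswith(f'{field_name}:'):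
--             in_field = True
--             # Get value after colon
--             value = stripped.split(':', 1)[1].strip()
--             if value:
--                 current_value.append(value)
--             continue
--
--         # If we're in the field
--         if in_field:
--             # Check for end conditions
--             if (stripped == '' or                    # Empty line
--                 stripped.startswith('@') or           # Special directive
--                 (':' in stripped and                  # Another field
--                  not stripped.startswith('http://') and
--                  not stripped.startswith('https://'))):
--                 # Save current value and reset
--                 if current_value:
--                     values.append(' '.join(current_value))
--                     current_value = []
--                 in_field = False
--             else:
--                 # Continue collecting the multi-line value
--                 if stripped:
--                     current_value.append(stripped)
--
--     # Don't forget last value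
--     if current_value:
--         values.append(' '.join(current_value))
--
--     return values if values else None
-- ===== SOURCE B (Python) =====
-- def _extract_multiline_field(header, field_name):
--     """Index-based scan: an outer loop finds each field start, an inner loop
--     collects that value's continuation lines up to the terminator."""
--     lines = header.split('\n')
--     prefix = field_name + ':'
--     n = len(lines)
--     values = []
--     i = 0
--     while i < n:
--         stripped = lines[i].strip()
--         if stripped.lower().startswith(prefix):
--             v = stripped.split(':', 1)[1].strip()
--             current = [v] if v else []
--             j = i + 1
--             while j < n:
--                 s = lines[j].strip()
--                 if s.lower().startswith(prefix):
--                     v = s.split(':', 1)[1].strip()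
--                     if v:
--                         current.append(v)
--                 elif (s == '' or s.startswith('@') or
--                       (':' in s and not s.startswith('http://')
--                        and not s.startswith('https://'))):
--                     break
--                 else:
--                     current.append(s)
--                 j += 1
--             if current:
--                 values.append(' '.join(current))
--             i = j + 1
--         else:
--             i += 1
--     return values if values else None
-- ===== Notes on version B (the rewrite author's own statement) =====
-- stated objective: alternative
-- what changed: A's single pass driven by an in_field flag and a mutable current_value buffer is replaced by an index-based nested scan: an outer while loop looks for field-start lines and, for each, an inner loop collects that one value's lines up to its terminator and resumes the outer scan after it.
import Mathlib
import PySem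

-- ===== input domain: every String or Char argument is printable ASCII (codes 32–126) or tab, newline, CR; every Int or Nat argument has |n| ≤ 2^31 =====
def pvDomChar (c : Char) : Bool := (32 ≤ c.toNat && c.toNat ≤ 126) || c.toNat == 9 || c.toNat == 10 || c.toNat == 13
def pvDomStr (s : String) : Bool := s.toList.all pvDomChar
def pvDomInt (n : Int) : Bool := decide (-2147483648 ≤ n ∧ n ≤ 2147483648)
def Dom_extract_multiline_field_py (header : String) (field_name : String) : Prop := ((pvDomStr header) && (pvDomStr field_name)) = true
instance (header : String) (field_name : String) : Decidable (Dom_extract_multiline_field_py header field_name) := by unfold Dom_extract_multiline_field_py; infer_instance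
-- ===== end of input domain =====

-- B re-decomposes A's one-pass three-variable state machine as an index-free nested scan
-- (outer loop finds field starts, inner loop collects one value); same return value, similar cost.

-- shared primitive helpers (identical expressions in both Pythons):
-- stripped.lower().startswith(f'{field_name}:')
def pvStartsField (stripped : String) (field_name : String) : Bool :=
  PySem.Chars.startswith (PySem.Str.lower stripped).toList (field_name.toList ++ [':'])

-- stripped.split(':', 1)[1].strip()  (index [1] exists whenever pvStartsField held, since the
-- prefix ends with ':'; the .getD defaults are never reached under that guard)
def pvAfterColon (stripped : String) : String :=
  PySem.Str.strip (((PySem.Str.splitMax? stripped ":" 1).getD []).getD 1 "")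

-- the end-of-field condition (empty line / '@' directive / another field)
def pvIsEnd (stripped : String) : Bool :=
  stripped == "" || PySem.Str.startswith stripped "@" ||
    (PySem.Str.isIn ":" stripped && !PySem.Str.startswith stripped "http://" &&
      !PySem.Str.startswith stripped "https://")

-- ===== PORT A =====
-- A's loop body: state = (values, in_field, current_value)
def pvStepA (field_name : String) (st : List String × Bool × List String) (line : String) :
    List String × Bool × List String :=
  let values := st.1; let in_field := st.2.1; let current := st.2.2
  let stripped := PySem.Str.strip line
  if pvStartsField stripped field_name then
    let v := pvAfterColon stripped
    (values, true, if v ≠ "" then current ++ [v] else current)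
  else if in_field then
    if pvIsEnd stripped then
      ((if current ≠ [] then values ++ [PySem.Str.join " " current] else values), false, [])
    else
      (values, true, if stripped ≠ "" then current ++ [stripped] else current)
  else st

def extract_multiline_field_py (header : String) (field_name : String) : Option (List String) :=
  -- header.split('\n')  (sep ≠ "", so split? is always some; .getD [] is never the default)
  let lines := (PySem.Str.split? header "\n").getD []
  let st := lines.foldl (pvStepA field_name) ([], false, [])
  let values := if st.2.2 ≠ [] then st.1 ++ [PySem.Str.join " " st.2.2] else st.1
  if values ≠ [] then some values else none

-- ===== PORT B =====
-- inner loop: collect one value's lines; returns (current, lines after the terminator)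
def pvInner (field_name : String) : List String → List String → List String × List String
  | [], current => (current, [])
  | l :: rest, current =>
    let s := PySem.Str.strip l
    if pvStartsField s field_name then
      let v := pvAfterColon s
      pvInner field_name rest (if v ≠ "" then current ++ [v] else current)
    else if pvIsEnd s then (current, rest)
    else pvInner field_name rest (current ++ [s])

theorem pvInner_length_le (field_name : String) (ls current : List String) :
    (pvInner field_name ls current).2.length ≤ ls.length := by
  induction ls generalizing current with
  | nil => simp [pvInner]
  | cons l rest ih =>
    simp only [pvInner]
    split_ifs <;> simp <;> exact le_trans (ih _) (Nat.le_succ _)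

-- outer loop: scan for field starts
def pvOuter (field_name : String) : List String → List String
  | [] => []
  | l :: rest =>
    let s := PySem.Str.strip l
    if pvStartsField s field_name then
      let v := pvAfterColon s
      let r := pvInner field_name rest (if v ≠ "" then [v] else [])
      (if r.1 ≠ [] then [PySem.Str.join " " r.1] else []) ++ pvOuter field_name r.2
    else pvOuter field_name rest
termination_by ls => ls.length
decreasing_by
  · exact Nat.lt_succ_of_le (pvInner_length_le _ _ _)
  · exact Nat.lt_succ_self _

def extract_multiline_field_py_alt (header : String) (field_name : String) : Option (List String) :=
  -- header.split('\n')  (sep ≠ "", so split? is always some; .getD [] is never the default)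
  let lines := (PySem.Str.split? header "\n").getD []
  let values := pvOuter field_name lines
  if values ≠ [] then some values else none

-- ===== PRECONDITION & SPEC =====
def Spec_extract_multiline_field_py (header : String) (field_name : String) (out : Option (List String)) : Prop := out = extract_multiline_field_py_alt header field_name
instance (header : String) (field_name : String) (out : Option (List String)) : Decidable (Spec_extract_multiline_field_py header field_name out) := by unfold Spec_extract_multiline_field_py; infer_instance

-- ===== CLAIM (what is proved, stated in full; the proofs are below) =====
def Claim_equal_extract_multiline_field_py : Prop := ∀ (header : String) (field_name : String), Dom_extract_multiline_field_py header field_name → Spec_extract_multiline_field_py header field_name (extract_multiline_field_py header field_name)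

-- ===== LEMMAS AND PROOFS =====

-- flush of a collected value
def pvFlush (c : List String) : List String :=
  if c ≠ [] then [PySem.Str.join " " c] else []

-- A's fold from a reachable state equals B's nested scan:
-- from (vals, false, []) it yields vals ++ pvOuter; from (vals, true, cur) it yields
-- vals ++ pvFlush of the inner result ++ pvOuter of the remainder.
theorem pvKey (field_name : String) (ls : List String) : ∀ (vals cur : List String),
    (let st := ls.foldl (pvStepA field_name) (vals, false, [])
     (if st.2.2 ≠ [] then st.1 ++ [PySem.Str.join " " st.2.2] else st.1)
       = vals ++ pvOuter field_name ls)
    ∧ (let st := ls.foldl (pvStepA field_name) (vals, true, cur)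
     (if st.2.2 ≠ [] then st.1 ++ [PySem.Str.join " " st.2.2] else st.1)
       = vals ++ pvFlush (pvInner field_name ls cur).1
              ++ pvOuter field_name (pvInner field_name ls cur).2) := by
  induction ls with
  | nil =>
    intro vals cur
    constructor
    · simp [pvOuter]
    · simp only [List.foldl]
      by_cases h : cur = [] <;> simp [pvInner, pvFlush, pvOuter, h]
  | cons l rest ih =>
    intro vals cur
    constructor
    · -- state (vals, false, [])
      simp only [List.foldl, pvStepA, pvOuter]
      by_cases hs : pvStartsField (PySem.Str.strip l) field_name
      · simp only [hs, if_true]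
        by_cases hv : pvAfterColon (PySem.Str.strip l) = ""
        · simpa [hv, pvFlush] using (ih vals []).2
        · simpa [hv, pvFlush] using (ih vals [pvAfterColon (PySem.Str.strip l)]).2
      · simpa [hs] using (ih vals []).1
    · -- state (vals, true, cur)
      simp only [List.foldl, pvStepA, pvInner]
      by_cases hs : pvStartsField (PySem.Str.strip l) field_name
      · simp only [hs, if_true]
        by_cases hv : pvAfterColon (PySem.Str.strip l) = ""
        · simpa [hv, pvFlush] using (ih vals cur).2
        · simpa [hv, pvFlush] using (ih vals (cur ++ [pvAfterColon (PySem.Str.strip l)])).2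
      · by_cases he : pvIsEnd (PySem.Str.strip l)
        · simp only [hs, he, if_false, if_true, Bool.false_eq_true]
          by_cases hc : cur = []
          · simpa [hc, pvFlush] using (ih vals []).1
          · simpa [hc, pvFlush, List.append_assoc] using
              (ih (vals ++ [PySem.Str.join " " cur]) []).1
        · -- continuation; the empty line is an end condition, so strip l ≠ ""
          have hne : PySem.Str.strip l ≠ "" := by
            intro h; apply he; simp [pvIsEnd, h]
          simpa [hs, he, hne, pvFlush] using (ih vals (cur ++ [PySem.Str.strip l])).2

-- ===== VERDICT (by name: the statement is the Claim_ definition above) =====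
theorem extract_multiline_field_py_spec : Claim_equal_extract_multiline_field_py := by
  intro header field_name _
  show _ = _
  unfold extract_multiline_field_py extract_multiline_field_py_alt
  have h := (pvKey field_name ((PySem.Str.split? header "\n").getD []) [] []).1
  simp only [] at h ⊢
  rw [h]
  simp
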